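-- pv_equiv track=rewrite | github.com/bluprince13/coding-interview-prep | arrays/test_count_decreasing_ratings.py | countDecreasingRatings
-- ===== SOURCE A (Python) =====
-- def countDecreasingRatings(arr):
--     n = len(arr)
--     if n == 0:
--         return 0
--     i, length, count = 1, 1, 0
--     while i < n:
--         if arr[i] == arr[i - 1] - 1:
--             length += 1
--         else:
--             count += (length * (length + 1)) // 2
--             length = 1
--         i += 1
--     count += (length * (length + 1)) // 2
--     return count
-- ===== SOURCE B (Python) =====
-- def countDecreasingRatings(arr):
--     total = 0
--     run = 0
--     prev = None
--     for x in arr: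
--         if prev is not None and x == prev - 1:
--             run += 1
--         else:
--             run = 1
--         total += run
--         prev = x
--     return total
-- ===== Notes on version B (the rewrite author's own statement) =====
-- stated objective: simpler
-- what changed: B replaces A's per-run triangular-formula accumulation (with a final flush after the loop) by a single pass that adds the length of the current decreasing run ending at each element, so no closed-form arithmetic and no post-loop step.
import Mathlib
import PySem

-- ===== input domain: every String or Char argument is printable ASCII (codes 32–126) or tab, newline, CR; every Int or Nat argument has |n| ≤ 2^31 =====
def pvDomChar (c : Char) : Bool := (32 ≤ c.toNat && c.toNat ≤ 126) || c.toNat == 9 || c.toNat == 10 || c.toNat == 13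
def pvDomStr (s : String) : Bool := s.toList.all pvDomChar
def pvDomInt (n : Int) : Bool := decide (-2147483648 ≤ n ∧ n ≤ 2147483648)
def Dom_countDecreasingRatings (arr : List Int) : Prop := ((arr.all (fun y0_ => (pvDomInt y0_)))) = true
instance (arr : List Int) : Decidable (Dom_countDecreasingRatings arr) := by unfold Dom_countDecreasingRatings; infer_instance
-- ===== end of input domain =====

-- B changes only the decomposition (per-element run accumulation instead of per-run triangular formula); same O(n) cost.

-- ===== PORT A =====
-- A's while loop over indices 1..n-1, carried as recursion on the tail with prev = arr[i-1].
def countDecreasingRatingsLoopA : List Int → Int → Int → Int → Int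
  | [], _, length, count => count + PySem.Int.floordiv (length * (length + 1)) 2
  | x :: xs, prev, length, count =>
      if x = prev - 1 then countDecreasingRatingsLoopA xs x (length + 1) count
      else countDecreasingRatingsLoopA xs x 1 (count + PySem.Int.floordiv (length * (length + 1)) 2)

def countDecreasingRatings (arr : List Int) : Int :=
  match arr with
  | [] => 0
  | a :: rest => countDecreasingRatingsLoopA rest a 1 0

-- ===== PORT B =====
def countDecreasingRatingsLoopB : List Int → Option Int → Int → Int → Int
  | [], _, _, total => total
  | x :: xs, prev, run, total =>
      let run' := match prev with
        | some p => if x = p - 1 then run + 1 else 1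
        | none => 1
      countDecreasingRatingsLoopB xs (some x) run' (total + run')

def countDecreasingRatings_alt (arr : List Int) : Int :=
  countDecreasingRatingsLoopB arr none 0 0

-- ===== PRECONDITION & SPEC =====
def Spec_countDecreasingRatings (arr : List Int) (out : Int) : Prop := out = countDecreasingRatings_alt arr
instance (arr : List Int) (out : Int) : Decidable (Spec_countDecreasingRatings arr out) := by unfold Spec_countDecreasingRatings; infer_instance

-- ===== CLAIM (what is proved, stated in full; the proofs are below) =====
def Claim_equal_countDecreasingRatings : Prop := ∀ (arr : List Int), Dom_countDecreasingRatings arr → Spec_countDecreasingRatings arr (countDecreasingRatings arr)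

-- ===== LEMMAS AND PROOFS =====

-- triangular numbers: floordiv (l*(l+1)) 2 is exact, and T(l) + (l+1) = T(l+1)
lemma tri_step (l : Int) :
    PySem.Int.floordiv (l * (l + 1)) 2 + (l + 1)
      = PySem.Int.floordiv ((l + 1) * (l + 1 + 1)) 2 := by
  rw [PySem.Int.floordiv_eq_ediv_of_pos (by omega), PySem.Int.floordiv_eq_ediv_of_pos (by omega)]
  obtain ⟨k, hk⟩ : ∃ k, l * (l + 1) = 2 * k := (Int.even_mul_succ_self l).exists_two_nsmul _
  have hk2 : (l + 1) * (l + 1 + 1) = 2 * (k + (l + 1)) := by linear_combination hk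
  rw [hk, hk2]
  omega

lemma loop_invariant (xs : List Int) :
    ∀ (prev length count : Int),
      countDecreasingRatingsLoopA xs prev length count
        = countDecreasingRatingsLoopB xs (some prev) length
            (count + PySem.Int.floordiv (length * (length + 1)) 2) := by
  induction xs with
  | nil => intro prev length count; simp [countDecreasingRatingsLoopA, countDecreasingRatingsLoopB]
  | cons x xs ih =>
    intro prev length count
    simp only [countDecreasingRatingsLoopA, countDecreasingRatingsLoopB]
    split_ifs with h
    · rw [ih]
      congr 1
      linarith [tri_step length]
    · rw [ih]
      congr 1

-- ===== VERDICT (by name: the statement is the Claim_ definition above) =====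
theorem countDecreasingRatings_spec : Claim_equal_countDecreasingRatings := by
  intro arr _
  unfold Spec_countDecreasingRatings countDecreasingRatings countDecreasingRatings_alt
  match arr with
  | [] => rfl
  | a :: rest =>
    simp only [countDecreasingRatingsLoopB]
    rw [loop_invariant]
    norm_num [PySem.Int.floordiv_eq_ediv_of_pos (show (0:Int) < 2 by omega)]
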